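-- pv_equiv track=rewrite | github.com/JPercyRUSENY/Test | exemple.py | PremierTermes
-- ===== SOURCE A (Python) =====
-- def PremierTermes(n):
--     tab = []
--     for i in range(n):
--         if i % 2 == 0:
--             tab.append(1)
--         else:
--             tab.append(-1)
--     return tab
-- ===== SOURCE B (Python) =====
-- def PremierTermes(n):
--     return ([1, -1] * ((n + 1) // 2))[:n]
-- ===== Notes on version B (the rewrite author's own statement) =====
-- stated objective: idiomatic
-- what changed: Replaces the per-element loop with its parity branch by replicating a fixed two-element alternating block and slicing it to the requested length.
import Mathlib
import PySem

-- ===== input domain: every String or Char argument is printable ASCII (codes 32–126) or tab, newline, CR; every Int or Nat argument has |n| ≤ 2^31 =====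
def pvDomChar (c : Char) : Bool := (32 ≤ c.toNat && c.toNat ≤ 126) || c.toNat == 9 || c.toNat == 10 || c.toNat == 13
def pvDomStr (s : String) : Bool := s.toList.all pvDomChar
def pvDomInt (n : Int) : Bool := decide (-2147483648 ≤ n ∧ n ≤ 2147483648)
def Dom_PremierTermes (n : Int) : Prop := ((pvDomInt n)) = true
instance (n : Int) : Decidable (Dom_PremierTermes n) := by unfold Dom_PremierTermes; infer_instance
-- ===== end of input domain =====

-- B builds the alternating list by replicating a fixed two-element block and slicing to the requested length (idiomatic; A loops with a parity branch).

-- ===== PORT A =====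
def PremierTermes (n : Int) : List Int :=
  (PySem.List.pyRange 0 n 1).foldl
    (fun tab i => tab ++ [if PySem.Int.mod i 2 = 0 then (1 : Int) else -1]) []

-- ===== PORT B =====
def PremierTermes_alt (n : Int) : List Int :=
  PySem.List.slice ((List.replicate (PySem.Int.floordiv (n + 1) 2).toNat ([1, -1] : List Int)).flatten)
    none (some n)

-- ===== PRECONDITION & SPEC =====
def Spec_PremierTermes (n : Int) (out : List Int) : Prop := out = PremierTermes_alt n
instance (n : Int) (out : List Int) : Decidable (Spec_PremierTermes n out) := by unfold Spec_PremierTermes; infer_instance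

-- ===== CLAIM (what is proved, stated in full; the proofs are below) =====
def Claim_equal_PremierTermes : Prop := ∀ (n : Int), Dom_PremierTermes n → Spec_PremierTermes n (PremierTermes n)

-- ===== LEMMAS AND PROOFS =====

theorem pv_foldl_app (l : List Int) (g : Int → Int) (acc : List Int) :
    l.foldl (fun t i => t ++ [g i]) acc = acc ++ l.map g := by
  induction l generalizing acc with
  | nil => simp
  | cons x xs ih => simp [ih]

theorem pv_flatten_replicate (k : Nat) :
    (List.replicate k ([1, -1] : List Int)).flatten
      = (List.range (2 * k)).map (fun i => if i % 2 = 0 then (1 : Int) else -1) := by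
  induction k with
  | zero => simp
  | succ k ih =>
      have h2 : 2 * (k + 1) = 2 * k + 1 + 1 := by omega
      rw [List.replicate_succ', List.flatten_append, ih, h2,
        List.range_succ, List.range_succ]
      simp [List.map_append, Nat.add_mod]

theorem pv_A_eq (n : Int) :
    PremierTermes n
      = (List.range n.toNat).map (fun i => if i % 2 = 0 then (1 : Int) else -1) := by
  unfold PremierTermes
  rw [pv_foldl_app, PySem.List.pyRange_one]
  simp only [List.nil_append, List.map_map, Int.sub_zero]
  refine List.map_congr_left ?_
  intro i _
  have h : (i : Int).fmod 2 = (i : Int) % 2 := by rw [Int.fmod_eq_emod]; simp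
  have h2 : ((i : Int) % 2 = 0) ↔ i % 2 = 0 := by omega
  simp [PySem.Int.mod, h, h2]

-- ===== VERDICT (by name: the statement is the Claim_ definition above) =====
theorem PremierTermes_spec : Claim_equal_PremierTermes := by
  unfold Claim_equal_PremierTermes
  intro n _
  unfold Spec_PremierTermes PremierTermes_alt
  rw [pv_A_eq, pv_flatten_replicate]
  by_cases hn : n ≤ 0
  · have h1 : n.toNat = 0 := by omega
    have h2 : (PySem.Int.floordiv (n + 1) 2).toNat = 0 := by
      rw [PySem.Int.floordiv_eq_ediv_of_pos (by omega : (0:Int) < 2)]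
      omega
    rw [h1, h2]
    simp [PySem.List.slice]
  · have h1 : n = (n.toNat : Int) := by omega
    rw [h1, PySem.List.slice_to_natCast]
    have h2 : PySem.Int.floordiv ((n.toNat : Int) + 1) 2 = ((n.toNat + 1) / 2 : Nat) := by
      have h3 := PySem.Int.floordiv_natCast (n.toNat + 1) 2
      push_cast at h3
      exact h3
    rw [h2, Int.toNat_natCast]
    rw [← List.map_take, List.take_range]
    congr 2
    rw [Int.toNat_natCast]
    omega
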